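-- pv_equiv track=rewrite | github.com/ravigithubshankar/Exe-file-hosting | app.py | structure_diagram_text
-- ===== SOURCE A (Python) =====
-- def structure_diagram_text(raw_text: str) -> str:
--     """
--     Converts a raw diagram/flowchart transcription into a structured, stepwise format.
--     """
--     lines = raw_text.splitlines()
--     structured_lines = []
--     step_count = 0
--     diagram_detected = False
--
--     for line in lines:
--         stripped = line.strip()
--         if not stripped:
--             continue
--
--         # Detect flowchart/diagram indicators
--         if any(x in stripped.lower() for x in ["->", "↓", "layer", "weight", "step"]):
--             diagram_detected = True
--
--         if diagram_detected:
--             # Convert numbered or arrowed lines into stepwise format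
--             if stripped[0].isdigit() and "." in stripped:
--                 step_count += 1
--                 structured_lines.append(f"Step {step_count}: {stripped.split('.', 1)[1].strip()}")
--             else:
--                 structured_lines.append(stripped)
--         else:
--             # Keep normal text as-is
--             structured_lines.append(stripped)
--
--     # Add a note for missing/unknown info
--
--
--     return "\n".join(structured_lines)
-- ===== SOURCE B (Python) =====
-- def structure_diagram_text(raw_text: str) -> str:
--     """
--     Converts a raw diagram/flowchart transcription into a structured, stepwise format.
--     Two-phase version: first find the pivot (first non-empty line with a diagram
--     indicator), then format the lines before / from the pivot in two simple passes.
--     """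
--     lines = raw_text.splitlines()
--
--     def is_trigger(s: str) -> bool:
--         low = s.lower()
--         return any(t in low for t in ("->", "\u2193", "layer", "weight", "step"))
--
--     pivot = len(lines)
--     for i, line in enumerate(lines):
--         s = line.strip()
--         if s and is_trigger(s):
--             pivot = i
--             break
--
--     out = [s for s in (l.strip() for l in lines[:pivot]) if s]
--
--     step = 0
--     for s in (l.strip() for l in lines[pivot:]):
--         if not s:
--             continue
--         if s[0].isdigit() and "." in s:
--             step += 1
--             out.append(f"Step {step}: {s.split('.', 1)[1].strip()}")
--         else:
--             out.append(s)
--     return "\n".join(out)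
-- ===== Notes on version B (the rewrite author's own statement) =====
-- stated objective: simpler
-- what changed: Replaces A's single pass carrying a mutable diagram_detected flag by first computing the pivot (index of the first non-empty trigger line) and then two plain formatting passes over the lines before and from the pivot.
import Mathlib
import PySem

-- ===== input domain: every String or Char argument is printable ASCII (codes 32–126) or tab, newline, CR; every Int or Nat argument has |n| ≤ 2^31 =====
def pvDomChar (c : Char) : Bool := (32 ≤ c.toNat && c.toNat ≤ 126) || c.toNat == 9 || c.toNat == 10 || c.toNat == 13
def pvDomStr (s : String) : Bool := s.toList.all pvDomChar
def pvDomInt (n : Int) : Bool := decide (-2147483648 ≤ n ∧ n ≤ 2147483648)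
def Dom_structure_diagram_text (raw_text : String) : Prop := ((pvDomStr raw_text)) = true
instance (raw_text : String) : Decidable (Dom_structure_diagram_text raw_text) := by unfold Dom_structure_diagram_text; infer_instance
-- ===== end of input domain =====

-- B restructures A's one-pass-with-mutable-flag into a pivot search plus two plain
-- formatting passes (objective: simpler decomposition; same output, proved equal below).

-- ===== PORT A =====

-- any(x in stripped.lower() for x in ["->", "↓", "layer", "weight", "step"])
def pvTriggerA (s : List Char) : Bool :=
  (["->", "↓", "layer", "weight", "step"].map String.toList).any
    (fun x => PySem.Chars.isIn x (PySem.Chars.lower s))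

-- stripped[0].isdigit() and "." in stripped
def pvStepLine (s : List Char) : Bool :=
  (match s with
   | c :: _ => PySem.Chars.isdigit c
   | [] => false) && PySem.Chars.isIn ['.'] s

-- f"Step {step}: {stripped.split('.', 1)[1].strip()}"
-- (the pyGetD default [] is unreachable: this is only called when '.' is in s, so
--  split('.', 1) has a second piece — exact on every call site)
def pvStepFmt (step : Int) (s : List Char) : List Char :=
  "Step ".toList ++ PySem.Int.toChars step ++ ": ".toList ++
    PySem.Chars.strip (PySem.List.pyGetD (PySem.Chars.splitOnMax s ['.'] 1) 1 [])

-- the for-loop of A, carrying (step_count, diagram_detected); appends become conses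
def pvLoopA : List (List Char) → Int → Bool → List (List Char)
  | [], _, _ => []
  | l :: ls, step, det =>
    let s := PySem.Chars.strip l
    if s = [] then pvLoopA ls step det
    else
      let det' := det || pvTriggerA s
      if det' then
        if pvStepLine s then pvStepFmt (step + 1) s :: pvLoopA ls (step + 1) det'
        else s :: pvLoopA ls step det'
      else s :: pvLoopA ls step det'

def structure_diagram_text (raw_text : String) : String :=
  String.ofList (PySem.Chars.join ['\n']
    (pvLoopA (PySem.Chars.splitlines raw_text.toList) 0 false))

-- ===== PORT B =====

-- is_trigger(s): any(t in s.lower() for t in ("->", "↓", "layer", "weight", "step"))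
def pvTriggerB (s : List Char) : Bool :=
  let low := PySem.Chars.lower s
  PySem.Chars.isIn "->".toList low || PySem.Chars.isIn "↓".toList low ||
  PySem.Chars.isIn "layer".toList low || PySem.Chars.isIn "weight".toList low ||
  PySem.Chars.isIn "step".toList low

-- the pivot search: index of the first non-empty stripped line that is a trigger
def pvFindPivot : List (List Char) → Nat
  | [] => 0
  | l :: ls =>
    let s := PySem.Chars.strip l
    if s ≠ [] ∧ pvTriggerB s then 0 else pvFindPivot ls + 1

-- [s for s in (l.strip() for l in pre) if s]
def pvPreLines (ls : List (List Char)) : List (List Char) :=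
  (ls.map PySem.Chars.strip).filter (· ≠ [])

-- the second pass: stepwise formatting with a counter
def pvStepLoop : List (List Char) → Int → List (List Char)
  | [], _ => []
  | l :: ls, step =>
    let s := PySem.Chars.strip l
    if s = [] then pvStepLoop ls step
    else if pvStepLine s then pvStepFmt (step + 1) s :: pvStepLoop ls (step + 1)
    else s :: pvStepLoop ls step

def structure_diagram_text_alt (raw_text : String) : String :=
  let lines := PySem.Chars.splitlines raw_text.toList
  let p := pvFindPivot lines
  String.ofList (PySem.Chars.join ['\n']
    (pvPreLines (lines.take p) ++ pvStepLoop (lines.drop p) 0))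

-- ===== PRECONDITION & SPEC =====
def Spec_structure_diagram_text (raw_text : String) (out : String) : Prop := out = structure_diagram_text_alt raw_text
instance (raw_text : String) (out : String) : Decidable (Spec_structure_diagram_text raw_text out) := by unfold Spec_structure_diagram_text; infer_instance

-- ===== CLAIM (what is proved, stated in full; the proofs are below) =====
def Claim_equal_structure_diagram_text : Prop := ∀ (raw_text : String), Dom_structure_diagram_text raw_text → Spec_structure_diagram_text raw_text (structure_diagram_text raw_text)

-- ===== LEMMAS AND PROOFS =====

theorem pvTriggerB_eq (s : List Char) : pvTriggerB s = pvTriggerA s := by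
  simp [pvTriggerA, pvTriggerB, Bool.or_assoc]

-- once the flag is true, A's loop is exactly B's stepwise pass
theorem pvLoopA_true (ls : List (List Char)) :
    ∀ step, pvLoopA ls step true = pvStepLoop ls step := by
  induction ls with
  | nil => intro step; rfl
  | cons l ls ih =>
    intro step
    simp only [pvLoopA, pvStepLoop, Bool.true_or]
    split_ifs with h1 h2 <;> simp [ih]

-- with the flag false, A's loop is B's pivot decomposition
theorem pvLoopA_false (ls : List (List Char)) :
    ∀ step, pvLoopA ls step false =
      pvPreLines (ls.take (pvFindPivot ls)) ++ pvStepLoop (ls.drop (pvFindPivot ls)) step := by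
  induction ls with
  | nil => intro step; rfl
  | cons l ls ih =>
    intro step
    simp only [pvLoopA, pvFindPivot]
    by_cases hs : PySem.Chars.strip l = []
    · simp [hs, pvTriggerB_eq, pvPreLines, ih step]
    · by_cases ht : pvTriggerA (PySem.Chars.strip l) = true
      · simp only [hs, ht, pvTriggerB_eq, ne_eq, not_false_iff, and_self, if_true,
          if_false, Bool.false_or, List.take_zero, List.drop_zero, pvStepLoop]
        by_cases h2 : pvStepLine (PySem.Chars.strip l) = true <;>
          simp [h2, pvLoopA_true, pvPreLines]
      · have ht' : pvTriggerA (PySem.Chars.strip l) = false := by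
          cases h : pvTriggerA (PySem.Chars.strip l) <;> simp_all
        simp [hs, ht', pvTriggerB_eq, pvPreLines, ih step]

-- ===== VERDICT (by name: the statement is the Claim_ definition above) =====
theorem structure_diagram_text_spec : Claim_equal_structure_diagram_text := by
  intro raw_text _
  unfold Spec_structure_diagram_text structure_diagram_text structure_diagram_text_alt
  rw [pvLoopA_false]
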